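-- pv_equiv track=rewrite | github.com/Rudruil/FlightRadar-ProjetNSI- | adsb.py | bin2int
-- ===== SOURCE A (Python) =====
-- def bin2int(code): # fonction bin2int: convertir bin en decimal
-- 	a=0
-- 	if isinstance(code,list):
-- 		for i in range(len(code)):
-- 			a+=code[len(code)-i-1]*(2**i)
-- 		return a
-- 	else:
-- 		return code
-- ===== SOURCE B (Python) =====
-- def bin2int(code):  # Horner's method: doubling accumulator, MSB-to-LSB, instead of summing 2**i power terms over a reversed index
--     if isinstance(code, list):
--         a = 0
--         for bit in code:
--             a = a * 2 + bit
--         return a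
--     else:
--         return code
-- ===== Notes on version B (the rewrite author's own statement) =====
-- stated objective: faster
-- what changed: Replaces the reversed-index loop summing code[len-i-1]*2**i power terms with Horner's method: a single forward pass maintaining a doubling accumulator a = a*2 + bit, with no indexing and no per-step 2**i exponentiation.
import Mathlib
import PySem

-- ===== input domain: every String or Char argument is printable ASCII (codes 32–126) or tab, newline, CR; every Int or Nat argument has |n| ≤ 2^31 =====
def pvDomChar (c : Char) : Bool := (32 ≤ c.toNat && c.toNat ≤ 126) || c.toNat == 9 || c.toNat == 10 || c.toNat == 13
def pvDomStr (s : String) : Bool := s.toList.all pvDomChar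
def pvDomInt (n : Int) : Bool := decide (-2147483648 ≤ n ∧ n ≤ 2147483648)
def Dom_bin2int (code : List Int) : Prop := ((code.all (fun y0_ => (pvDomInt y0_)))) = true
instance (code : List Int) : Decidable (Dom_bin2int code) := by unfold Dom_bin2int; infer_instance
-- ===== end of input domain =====

-- B replaces A's reversed-index sum of code[len-i-1]*2**i by Horner's method (a = a*2 + bit, forward pass); same value, simpler.

-- ===== PORT A =====
-- a=0; for i in range(len(code)): a += code[len(code)-i-1]*(2**i); return a
-- (the isinstance(code,list) branch is always taken for a List Int argument;
--  the index len-i-1 is always in range, so pyGetD is exact here)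
def bin2int (code : List Int) : Int :=
  (PySem.List.pyRange 0 (code.length : Int) 1).foldl
    (fun a i => a + (PySem.List.pyGetD code ((code.length : Int) - i - 1) 0) * 2 ^ i.toNat) 0

-- ===== PORT B =====
-- a=0; for bit in code: a = a*2 + bit; return a
def bin2int_alt (code : List Int) : Int :=
  code.foldl (fun a bit => a * 2 + bit) 0

-- ===== PRECONDITION & SPEC =====
def Spec_bin2int (code : List Int) (out : Int) : Prop := out = bin2int_alt code
instance (code : List Int) (out : Int) : Decidable (Spec_bin2int code out) := by unfold Spec_bin2int; infer_instance

-- ===== CLAIM (what is proved, stated in full; the proofs are below) =====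
def Claim_equal_bin2int : Prop := ∀ (code : List Int), Dom_bin2int code → Spec_bin2int code (bin2int code)

-- ===== LEMMAS AND PROOFS =====

-- big-endian value of a bit list (proof-only reference function)
def pvBval : List Int → Int
  | [] => 0
  | x :: t => x * 2 ^ t.length + pvBval t

theorem pvHorner (xs : List Int) : ∀ init : Int,
    xs.foldl (fun a bit => a * 2 + bit) init = init * 2 ^ xs.length + pvBval xs := by
  induction xs with
  | nil => intro init; simp [pvBval]
  | cons y t ih =>
      intro init
      simp only [List.foldl_cons, ih, pvBval, List.length_cons]
      ring

theorem pvA_range (xs : List Int) : ∀ init : Int,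
    (List.range xs.length).foldl
      (fun a k => a + xs.getD (xs.length - 1 - k) 0 * 2 ^ k) init = init + pvBval xs := by
  induction xs with
  | nil => intro init; simp [pvBval]
  | cons y t ih =>
      intro init
      simp only [List.length_cons]
      rw [List.range_succ, List.foldl_append]
      have hcongr : (List.range t.length).foldl
          (fun a k => a + (y :: t).getD (t.length + 1 - 1 - k) 0 * 2 ^ k) init
          = (List.range t.length).foldl
          (fun a k => a + t.getD (t.length - 1 - k) 0 * 2 ^ k) init := by
        apply PySem.List.foldl_congr_mem
        intro acc k hk
        have hk' : k < t.length := List.mem_range.mp hk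
        have h1 : t.length + 1 - 1 - k = (t.length - k - 1) + 1 := by omega
        have h2 : t.length - 1 - k = t.length - k - 1 := by omega
        rw [h1, h2]
        simp [List.getD]
      rw [hcongr, ih]
      have hget : (y :: t).getD (t.length + 1 - 1 - t.length) 0 = y := by
        simp
      simp only [List.foldl_cons, List.foldl_nil, hget, pvBval]
      ring

theorem pvA_eq (code : List Int) : bin2int code = pvBval code := by
  unfold bin2int
  rw [PySem.List.pyRange_zero_nat, List.foldl_map]
  have hcongr : (List.range code.length).foldl
      (fun (a : Int) (k : Nat) => a + PySem.List.pyGetD code ((code.length : Int) - (k : Int) - 1) 0 * 2 ^ ((k : Int)).toNat) 0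
      = (List.range code.length).foldl
      (fun (a : Int) (k : Nat) => a + code.getD (code.length - 1 - k) 0 * 2 ^ k) 0 := by
    apply PySem.List.foldl_congr_mem
    intro acc k hk
    have hk' : k < code.length := List.mem_range.mp hk
    have hidx : (code.length : Int) - (k : Int) - 1 = ((code.length - 1 - k : Nat) : Int) := by
      omega
    rw [hidx, PySem.List.pyGetD_natCast]
    simp
  rw [hcongr, pvA_range]
  ring

-- ===== VERDICT (by name: the statement is the Claim_ definition above) =====
theorem bin2int_spec : Claim_equal_bin2int := by
  intro code _
  unfold Spec_bin2int bin2int_alt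
  rw [pvA_eq, pvHorner]
  ring
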